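-- pv_equiv track=rewrite | github.com/zeshanalvi/LCS-Algorithms | MLCS2011.py | generate_transition_matrix
-- ===== SOURCE A (Python) =====
-- def generate_transition_matrix(S, Sigma):
--     """
--     Generates the transition matrix for the given sequences and alphabet.
--
--     Parameters:
--     S (list of strings): The input sequences.
--     Sigma (set): The alphabet.
--
--     Returns:
--     dict: The transition matrix.
--     """
--     T = {e: [[] for _ in range(len(S))] for e in Sigma}
--     for seq_idx, seq in enumerate(S):
--         next_pos = {e: len(seq) for e in Sigma}
--         for i in reversed(range(len(seq) + 1)):
--             for e in Sigma:
--                 if i < len(seq):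
--                     T[e][seq_idx].append(next_pos[e])
--                 if i > 0 and seq[i-1] == e:
--                     next_pos[e] = i - 1
--         for e in Sigma:
--             T[e][seq_idx].reverse()
--     return T
-- ===== SOURCE B (Python) =====
-- def generate_transition_matrix(S, Sigma):
--     """Occurrence-list + run-length expansion: for each (symbol, sequence) collect the
--     positions where the symbol occurs, then build the row forward by repeating each
--     occurrence over its segment; no positional scan and no next-position tracking."""
--
--     def _row(e, seq):
--         n = len(seq)
--         occ = [i for i, c in enumerate(seq) if c == e]
--         row = []
--         start = 0
--         for p in occ:
--             row += [p] * (p - start + 1)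
--             start = p + 1
--         row += [n] * (n - start)
--         return row
--
--     return {e: [_row(e, seq) for seq in S] for e in Sigma}
-- ===== Notes on version B (the rewrite author's own statement) =====
-- stated objective: alternative
-- what changed: A interleaves all symbols in one position-outer backward pass per sequence (append each symbol's shared next_pos at every position, then reverse each row); B never scans positions tracking a next-occurrence at all: per (symbol, sequence) it first collects the occurrence-position list in one forward filter, then builds the row by run-length expansion, repeating each occurrence index over its whole segment.
import Mathlib
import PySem

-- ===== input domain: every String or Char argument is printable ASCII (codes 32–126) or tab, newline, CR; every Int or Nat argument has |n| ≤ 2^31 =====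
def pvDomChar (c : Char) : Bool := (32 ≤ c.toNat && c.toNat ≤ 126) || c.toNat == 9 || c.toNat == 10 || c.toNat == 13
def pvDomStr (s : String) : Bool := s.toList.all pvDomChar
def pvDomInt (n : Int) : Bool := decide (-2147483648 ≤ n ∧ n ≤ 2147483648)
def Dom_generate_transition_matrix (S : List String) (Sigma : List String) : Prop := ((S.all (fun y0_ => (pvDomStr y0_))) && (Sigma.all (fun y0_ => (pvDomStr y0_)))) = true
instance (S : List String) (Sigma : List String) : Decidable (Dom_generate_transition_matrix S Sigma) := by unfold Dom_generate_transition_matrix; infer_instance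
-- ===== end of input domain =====

-- B replaces A's position-outer backward pass (append each symbol's shared next_pos at every
-- position, then reverse each row) by a per-(symbol, sequence) occurrence list collected forward,
-- expanded into the row by run-length repetition; same values, different algorithmic shape.

-- ===== PORT A =====
-- A-side helpers: the two loop bodies of A, named so the proofs below can refer to them.
-- inner 'for e in Sigma' body of the position loop (append next_pos[e], then maybe update next_pos[e])
def pvStepA (Sigma : List String) (seq_idx : Int) (seq : String) (n : Int)
    (st : PySem.Dict String (List (List Int)) × PySem.Dict String Int) (i : Int) :
    PySem.Dict String (List (List Int)) × PySem.Dict String Int :=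
  Sigma.foldl (fun st e =>
    let T1 := if i < n then
        st.1.modify e [] (fun rows => PySem.List.pySetD rows seq_idx (PySem.List.pyGetD rows seq_idx [] ++ [st.2.getD e 0]))
      else st.1
    let np1 := if 0 < i ∧ ((PySem.Str.pyGet? seq (i-1)).any (fun c => String.ofList [c] == e)) = true then
        st.2.insert e (i-1) else st.2
    (T1, np1)) st

-- body of 'for seq_idx, seq in enumerate(S)'
def pvSeqA (Sigma : List String) (T : PySem.Dict String (List (List Int))) (p : Int × String) :
    PySem.Dict String (List (List Int)) :=
  let seq_idx := p.1
  let seq := p.2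
  let n : Int := PySem.Str.len seq
  let np0 : PySem.Dict String Int := Sigma.foldl (fun d e => d.insert e n) PySem.Dict.empty
  let st := ((PySem.List.pyRange 0 (n+1) 1).reverse).foldl (pvStepA Sigma seq_idx seq n) (T, np0)
  Sigma.foldl (fun T e =>
    T.modify e [] (fun rows => PySem.List.pySetD rows seq_idx ((PySem.List.pyGetD rows seq_idx []).reverse))) st.1

def generate_transition_matrix (S : List String) (Sigma : List String) : List (String × List (List Int)) :=
  let T0 : PySem.Dict String (List (List Int)) :=
    Sigma.foldl (fun d e => d.insert e ((PySem.List.pyRange 0 (S.length : Int) 1).map (fun _ => ([] : List Int)))) PySem.Dict.empty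
  ((PySem.List.enumerate S).foldl (pvSeqA Sigma) T0).items

-- ===== PORT B =====
-- B-side helper: the forward occurrence-list + run-length expansion _row(e, seq) of Source B
def pvRowB (e : String) (seq : String) : List Int :=
  let n : Int := PySem.Str.len seq
  let occ : List Int := ((PySem.List.enumerate seq.toList 0).filter
      (fun p => String.ofList [p.2] == e)).map (fun p => p.1)
  let st := occ.foldl (fun (st : List Int × Int) p =>
      (st.1 ++ PySem.List.pyRepeat [p] (p - st.2 + 1), p + 1)) (([] : List Int), (0:Int))
  st.1 ++ PySem.List.pyRepeat [n] (n - st.2)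

def generate_transition_matrix_alt (S : List String) (Sigma : List String) : List (String × List (List Int)) :=
  (Sigma.foldl (fun d e => d.insert e (S.map (fun seq => pvRowB e seq))) PySem.Dict.empty).items

-- ===== PRECONDITION & SPEC =====
-- Sigma is a set in Python, so its List port never carries duplicates; Pre_ records exactly that
-- (on a duplicated list symbol A's all-symbol inner loop would append to the duplicated row twice per position,
--  a duplicate-key corner no set-typed call can reach).
def Pre_generate_transition_matrix (S : List String) (Sigma : List String) : Prop := Sigma.Nodup
instance (S : List String) (Sigma : List String) : Decidable (Pre_generate_transition_matrix S Sigma) := by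
  unfold Pre_generate_transition_matrix; infer_instance
def pvWitness_generate_transition_matrix : List String × List String := (["abc", "b"], ["a", "b"])

def Spec_generate_transition_matrix (S : List String) (Sigma : List String) (out : List (String × List (List Int))) : Prop := out = generate_transition_matrix_alt S Sigma
instance (S : List String) (Sigma : List String) (out : List (String × List (List Int))) : Decidable (Spec_generate_transition_matrix S Sigma out) := by unfold Spec_generate_transition_matrix; infer_instance

-- ===== CLAIM (what is proved, stated in full; the proofs are below) =====
def Claim_equal_generate_transition_matrix : Prop := ∀ (S : List String) (Sigma : List String), Dom_generate_transition_matrix S Sigma → Pre_generate_transition_matrix S Sigma → Spec_generate_transition_matrix S Sigma (generate_transition_matrix S Sigma)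

-- ===== LEMMAS AND PROOFS =====

-- next occurrence of symbol e in cs at an index ≥ i (cs.length if none): the value both rows hold at index i
def pvNxt (e : String) (cs : List Char) (i : Nat) : Int :=
  if h : i < cs.length then
    if String.ofList [cs[i]] == e then (i : Int) else pvNxt e cs (i+1)
  else (cs.length : Int)
termination_by cs.length - i
def pvRowS (e : String) (cs : List Char) : List Int := (List.range cs.length).map (pvNxt e cs)

-- scalar shadow of pvStepA at one key e
def pvSStepA (e : String) (seq : String) (seq_idx n : Int) (p : List (List Int) × Int) (i : Int) :
    List (List Int) × Int :=
  (if i < n then PySem.List.pySetD p.1 seq_idx (PySem.List.pyGetD p.1 seq_idx [] ++ [p.2]) else p.1,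
   if 0 < i ∧ ((PySem.Str.pyGet? seq (i-1)).any (fun c => String.ofList [c] == e)) = true then i - 1 else p.2)

theorem pvPairFold {V W : Type} (dV : V) (dW : W) (K : List String)
    (step : (PySem.Dict String V × PySem.Dict String W) → String →
            (PySem.Dict String V × PySem.Dict String W))
    (F : String → V → W → V) (G : String → W → W)
    (hkeys : ∀ st x, x ∈ K → st.1.keys = K → (step st x).1.keys = K)
    (hself : ∀ st e, e ∈ K → st.1.keys = K →
        (step st e).1.getD e dV = F e (st.1.getD e dV) (st.2.getD e dW) ∧
        (step st e).2.getD e dW = G e (st.2.getD e dW))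
    (hother : ∀ st x e, x ≠ e →
        (step st x).1.getD e dV = st.1.getD e dV ∧ (step st x).2.getD e dW = st.2.getD e dW) :
    ∀ (Sig : List String), (∀ x ∈ Sig, x ∈ K) → Sig.Nodup →
      ∀ st, st.1.keys = K →
        (Sig.foldl step st).1.keys = K ∧
        ∀ e ∈ Sig, (Sig.foldl step st).1.getD e dV = F e (st.1.getD e dV) (st.2.getD e dW) ∧
                   (Sig.foldl step st).2.getD e dW = G e (st.2.getD e dW) := by
  have hpres : ∀ (l : List String) (st) (e : String), e ∉ l →
      (l.foldl step st).1.getD e dV = st.1.getD e dV ∧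
      (l.foldl step st).2.getD e dW = st.2.getD e dW := by
    intro l
    induction l with
    | nil => intro st e _; exact ⟨rfl, rfl⟩
    | cons y t iht =>
        intro st e hne
        simp only [List.foldl_cons]
        obtain ⟨h1, h2⟩ := iht (step st y) e (fun h => hne (List.mem_cons_of_mem _ h))
        obtain ⟨h3, h4⟩ := hother st y e (fun h : y = e => hne (h ▸ List.mem_cons_self ..))
        exact ⟨h1.trans h3, h2.trans h4⟩
  intro Sig
  induction Sig with
  | nil => intro _ _ st hk; exact ⟨hk, by simp⟩
  | cons x rest ih =>
      intro hsub hnd st hk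
      simp only [List.foldl_cons]
      have hxK : x ∈ K := hsub x (List.mem_cons_self ..)
      obtain ⟨hknd, hnd'⟩ := List.nodup_cons.mp hnd
      have hk1 : (step st x).1.keys = K := hkeys st x hxK hk
      obtain ⟨hkeys', hval⟩ := ih (fun y hy => hsub y (List.mem_cons_of_mem _ hy)) hnd' _ hk1
      refine ⟨hkeys', ?_⟩
      intro e he
      rcases List.mem_cons.mp he with rfl | he'
      · obtain ⟨h1, h2⟩ := hpres rest (step st e) e hknd
        obtain ⟨h3, h4⟩ := hself st e hxK hk
        exact ⟨h1.trans h3, h2.trans h4⟩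
      · obtain ⟨h1, h2⟩ := hval e he'
        have hne : x ≠ e := fun h => hknd (h ▸ he')
        obtain ⟨h3, h4⟩ := hother st x e hne
        rw [h1, h2, h3, h4]
        exact ⟨rfl, rfl⟩

theorem pvStepA_read (Sigma : List String) (hnd : Sigma.Nodup) (seq : String) (m n i : Int)
    (st : PySem.Dict String (List (List Int)) × PySem.Dict String Int)
    (hk : st.1.keys = Sigma) :
    (pvStepA Sigma m seq n st i).1.keys = Sigma ∧
    ∀ e ∈ Sigma,
      ((pvStepA Sigma m seq n st i).1.getD e [], (pvStepA Sigma m seq n st i).2.getD e 0) =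
        pvSStepA e seq m n (st.1.getD e [], st.2.getD e 0) i := by
  obtain ⟨hkeys, hval⟩ := pvPairFold ([] : List (List Int)) (0 : Int) Sigma
    (fun st e =>
      (if i < n then
        st.1.modify e [] (fun rows => PySem.List.pySetD rows m (PySem.List.pyGetD rows m [] ++ [st.2.getD e 0]))
      else st.1,
       if 0 < i ∧ ((PySem.Str.pyGet? seq (i-1)).any (fun c => String.ofList [c] == e)) = true then
        st.2.insert e (i-1) else st.2))
    (fun e rows np => (pvSStepA e seq m n (rows, np) i).1)
    (fun e np => (pvSStepA e seq m n ([], np) i).2)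
    (by
      intro st x hx hkeys
      dsimp only
      split_ifs with h
      · have hcont : st.1.contains x = true :=
          (PySem.Dict.contains_iff_mem_keys _ _).mpr (hkeys ▸ hx)
        rw [PySem.Dict.keys_modify, PySem.Dict.keys_insert_of_contains _ _ hcont, hkeys]
      · exact hkeys)
    (by
      intro st e he hkeys
      constructor
      · dsimp only [pvSStepA]
        split_ifs with h
        · rw [PySem.Dict.getD_modify]; simp
        · rfl
      · dsimp only [pvSStepA]
        split_ifs with h
        · rw [PySem.Dict.getD_insert]; simp
        · rfl)
    (by
      intro st x e hne
      constructor
      · dsimp only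
        split_ifs with h
        · rw [PySem.Dict.getD_modify, if_neg (fun h' => hne h'.symm)]
        · rfl
      · dsimp only
        split_ifs with h
        · rw [PySem.Dict.getD_insert, if_neg (fun h' => hne h'.symm)]
        · rfl)
    Sigma (fun _ h => h) hnd st hk
  refine ⟨hkeys, ?_⟩
  intro e he
  obtain ⟨h1, h2⟩ := hval e he
  rw [Prod.ext_iff]
  refine ⟨h1.trans rfl, h2.trans ?_⟩
  simp [pvSStepA]

theorem pvIFold (Sigma : List String) (hnd : Sigma.Nodup) (seq : String) (m n : Int)
    (iL : List Int) :
    ∀ st, st.1.keys = Sigma →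
      (iL.foldl (pvStepA Sigma m seq n) st).1.keys = Sigma ∧
      ∀ e ∈ Sigma,
        ((iL.foldl (pvStepA Sigma m seq n) st).1.getD e [],
         (iL.foldl (pvStepA Sigma m seq n) st).2.getD e 0) =
        iL.foldl (pvSStepA e seq m n) (st.1.getD e [], st.2.getD e 0) := by
  induction iL with
  | nil => intro st hk; exact ⟨hk, fun e he => rfl⟩
  | cons i t ih =>
      intro st hk
      simp only [List.foldl_cons]
      obtain ⟨hk1, hval1⟩ := pvStepA_read Sigma hnd seq m n i st hk
      obtain ⟨hk2, hval2⟩ := ih _ hk1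
      refine ⟨hk2, ?_⟩
      intro e he
      rw [hval2 e he, hval1 e he]

theorem pvNxt_ge (e : String) (cs : List Char) (i : Nat) (h : cs.length ≤ i) :
    pvNxt e cs i = (cs.length : Int) := by
  rw [pvNxt, dif_neg (by omega)]

theorem pvNxt_lt (e : String) (cs : List Char) (i : Nat) (h : i < cs.length) :
    pvNxt e cs i = if String.ofList [cs[i]] == e then (i : Int) else pvNxt e cs (i+1) := by
  rw [pvNxt, dif_pos h]

-- the update branch of pvSStepA computes pvNxt

theorem pvCond_eq (e seq : String) (cs : List Char) (hcs : cs = seq.toList) (j : Nat)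
    (hj : j < cs.length) :
    (if 0 < ((j:Int)+1) ∧ ((PySem.Str.pyGet? seq (((j:Int)+1)-1)).any (fun c => String.ofList [c] == e)) = true
       then ((j:Int)+1) - 1 else pvNxt e cs (j+1)) = pvNxt e cs j := by
  have h1 : ((j:Int)+1) - 1 = (j:Int) := by omega
  have hj' : j < seq.toList.length := hcs ▸ hj
  rw [h1, PySem.Str.pyGet?_eq, PySem.Chars.pyGet?_eq_listPyGet?, ← hcs,
      PySem.List.pyGet?_natCast, List.getElem?_eq_getElem hj, pvNxt_lt e cs j hj]
  by_cases hc : (String.ofList [cs[j]] == e) = true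
  · rw [if_pos ⟨by omega, by simp [hc]⟩, if_pos hc]
  · rw [if_neg, if_neg hc]
    rintro ⟨-, hb⟩
    simp only [Option.any_some] at hb
    exact hc hb

theorem pvAScalar (e seq : String) (cs : List Char) (hcs : cs = seq.toList) (m : Nat) :
    ∀ (k : Nat), k < cs.length →
      ∀ rows : List (List Int), m < rows.length →
        (PySem.List.pyRange (k : Int) (-1) (-1)).foldl
            (pvSStepA e seq (m : Int) (cs.length : Int)) (rows, pvNxt e cs k) =
          (PySem.List.pySetD rows (m : Int)
             (PySem.List.pyGetD rows (m : Int) [] ++ ((List.range (k+1)).map (pvNxt e cs)).reverse),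
           pvNxt e cs 0) := by
  intro k
  induction k with
  | zero =>
      intro hk rows hm
      rw [PySem.List.pyRange_neg_one_cons (by omega), PySem.List.pyRange_neg_one_eq_nil (by omega)]
      simp only [List.foldl_cons, List.foldl_nil, pvSStepA]
      rw [if_pos (by exact_mod_cast hk), if_neg (by omega)]
      simp
  | succ j ih =>
      intro hk rows hm
      rw [show ((j+1 : Nat) : Int) = (j:Int)+1 by push_cast; ring] at *
      rw [PySem.List.pyRange_neg_one_cons (by omega)]
      simp only [List.foldl_cons]
      have hstep : pvSStepA e seq (m : Int) (cs.length : Int) (rows, pvNxt e cs (j+1)) ((j:Int)+1) =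
          (PySem.List.pySetD rows (m : Int)
            (PySem.List.pyGetD rows (m : Int) [] ++ [pvNxt e cs (j+1)]), pvNxt e cs j) := by
        unfold pvSStepA
        rw [if_pos (by exact_mod_cast hk)]
        rw [pvCond_eq e seq cs hcs j (by omega)]
      have hco : ((j:Int)+1) - 1 = (j:Int) := by omega
      rw [hstep, hco]
      rw [ih (by omega) _ (by rw [PySem.List.length_pySetD]; exact hm)]
      have hg : PySem.List.pyGetD
            (PySem.List.pySetD rows ((m:Nat) : Int) (PySem.List.pyGetD rows ((m:Nat):Int) [] ++ [pvNxt e cs (j+1)]))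
            ((m:Nat):Int) [] = PySem.List.pyGetD rows ((m:Nat):Int) [] ++ [pvNxt e cs (j+1)] := by
        rw [PySem.List.pyGetD_pySetD_natCast rows m m _ [] hm, if_pos rfl]
      rw [hg, PySem.List.pySetD_natCast, PySem.List.pySetD_natCast, PySem.List.pySetD_natCast,
          List.set_set]
      congr 2
      rw [List.append_assoc]
      congr 1
      rw [List.range_succ (n := j+1)]
      simp

theorem pvAScalarFull (e seq : String) (cs : List Char) (hcs : cs = seq.toList) (m : Nat)
    (rows : List (List Int)) (hm : m < rows.length) :
    ((PySem.List.pyRange 0 ((cs.length : Int) + 1) 1).reverse).foldl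
        (pvSStepA e seq (m : Int) (cs.length : Int)) (rows, (cs.length : Int)) =
      (PySem.List.pySetD rows (m : Int)
         (PySem.List.pyGetD rows (m : Int) [] ++ (pvRowS e cs).reverse),
       pvNxt e cs 0) := by
  rw [show (PySem.List.pyRange 0 ((cs.length : Int) + 1) 1).reverse
        = PySem.List.pyRange (cs.length : Int) (-1) (-1) by
      rw [PySem.List.pyRange_neg_one_eq_reverse]; norm_num]
  rcases Nat.eq_zero_or_pos cs.length with h0 | hpos
  · rw [h0]
    rw [show ((0:Nat) : Int) = 0 by norm_num]
    rw [PySem.List.pyRange_neg_one_cons (by omega), PySem.List.pyRange_neg_one_eq_nil (by omega)]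
    simp only [List.foldl_cons, List.foldl_nil, pvSStepA]
    rw [if_neg (by omega), if_neg (by omega)]
    have hrs : pvRowS e cs = [] := by unfold pvRowS; rw [h0]; rfl
    rw [hrs, pvNxt_ge e cs 0 (by omega), h0]
    simp only [List.reverse_nil, List.append_nil]
    rw [PySem.List.pySetD_natCast]
    rw [PySem.List.pyGetD_natCast, List.getD_eq_getElem rows [] hm, List.set_getElem_self]
    norm_num
  · obtain ⟨k, hkk⟩ : ∃ k, cs.length = k + 1 := ⟨cs.length - 1, by omega⟩
    have hcast : ((cs.length : Nat) : Int) = (k : Int) + 1 := by omega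
    rw [hcast, PySem.List.pyRange_neg_one_cons (by omega),
        show ((k:Int)+1-1) = (k:Int) by ring]
    simp only [List.foldl_cons]
    have hnp : ((k:Int)+1) = pvNxt e cs (k+1) := by
      rw [pvNxt_ge e cs (k+1) (by omega)]; omega
    have hstep : pvSStepA e seq (m : Int) ((k:Int)+1) (rows, (k:Int)+1) ((k:Int)+1) =
        (rows, pvNxt e cs k) := by
      unfold pvSStepA
      rw [if_neg (by omega)]
      have h := pvCond_eq e seq cs hcs k (by omega)
      rw [← hnp] at h
      rw [h]
    rw [hstep]
    rw [show pvNxt e cs k = pvNxt e cs k from rfl]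
    have hAS := pvAScalar e seq cs hcs m k (by omega) rows hm
    rw [hcast] at hAS
    rw [hAS]
    unfold pvRowS
    rw [hkk]

-- ===== B-side lemmas: the occurrence-list expansion computes pvRowS =====

-- the match test at index i, as Source B's filter sees it
def pvMatch (e : String) (cs : List Char) (i : Nat) : Bool :=
  (cs[i]?.any fun c => String.ofList [c] == e)

theorem pvNxt_none (e : String) (cs : List Char) :
    ∀ i, i ≤ cs.length → (∀ j, i ≤ j → j < cs.length → pvMatch e cs j = false) →
      pvNxt e cs i = (cs.length : Int) := by
  intro i
  induction hn : cs.length - i using Nat.strong_induction_on generalizing i with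
  | _ k ih =>
      intro hi hno
      rcases Nat.lt_or_ge i cs.length with hlt | hge
      · have hm := hno i le_rfl hlt
        rw [pvMatch, List.getElem?_eq_getElem hlt] at hm
        simp only [Option.any_some] at hm
        rw [pvNxt_lt e cs i hlt, if_neg (by simp [hm])]
        exact ih (cs.length - (i+1)) (by omega) (i+1) rfl (by omega)
          (fun j hj1 hj2 => hno j (by omega) hj2)
      · exact pvNxt_ge e cs i hge

theorem pvNxt_upto (e : String) (cs : List Char) (p : Nat) (hp : p < cs.length)
    (hm : pvMatch e cs p = true) :
    ∀ i, i ≤ p → (∀ j, i ≤ j → j < p → pvMatch e cs j = false) →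
      pvNxt e cs i = (p : Int) := by
  intro i
  induction hn : p - i using Nat.strong_induction_on generalizing i with
  | _ k ih =>
      intro hi hno
      rcases Nat.lt_or_ge i p with hlt | hge
      · have hmi := hno i le_rfl hlt
        rw [pvMatch, List.getElem?_eq_getElem (by omega)] at hmi
        simp only [Option.any_some] at hmi
        rw [pvNxt_lt e cs i (by omega), if_neg (by simp [hmi])]
        exact ih (p - (i+1)) (by omega) (i+1) rfl (by omega)
          (fun j hj1 hj2 => hno j (by omega) hj2)
      · have hip : i = p := by omega
        subst hip
        rw [pvMatch, List.getElem?_eq_getElem hp] at hm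
        simp only [Option.any_some] at hm
        rw [pvNxt_lt e cs i hp, if_pos (by simpa using hm)]

-- the run-length fold of Source B, over an occurrence list that is exactly the matches in [s, cs.length)
theorem pvSegFold (e : String) (cs : List Char) :
    ∀ (occ : List Int) (s : Nat) (acc : List Int),
      s ≤ cs.length →
      (∀ x ∈ occ, ∃ j : Nat, x = (j:Int) ∧ s ≤ j ∧ j < cs.length ∧ pvMatch e cs j = true) →
      occ.Pairwise (· < ·) →
      (∀ j : Nat, s ≤ j → j < cs.length → pvMatch e cs j = true → (j:Int) ∈ occ) →
      (occ.foldl (fun (st : List Int × Int) p =>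
          (st.1 ++ PySem.List.pyRepeat [p] (p - st.2 + 1), p + 1)) (acc, (s:Int))).1
        ++ PySem.List.pyRepeat [(cs.length:Int)]
            ((cs.length:Int) - (occ.foldl (fun (st : List Int × Int) p =>
                (st.1 ++ PySem.List.pyRepeat [p] (p - st.2 + 1), p + 1)) (acc, (s:Int))).2)
      = acc ++ (List.range' s (cs.length - s)).map (pvNxt e cs) := by
  intro occ
  induction occ with
  | nil =>
      intro s acc hs _ _ hcompl
      simp only [List.foldl_nil]
      rw [PySem.List.pyRepeat_singleton]
      have hcnt : ((cs.length:Int) - (s:Int)).toNat = cs.length - s := by omega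
      rw [hcnt]
      congr 1
      have hval : ∀ i ∈ List.range' s (cs.length - s), pvNxt e cs i = (cs.length : Int) := by
        intro i hi
        rw [List.mem_range'_1] at hi
        exact pvNxt_none e cs i (by omega) (fun j hj1 hj2 => by
          by_contra hne
          have := hcompl j (by omega) hj2 (by revert hne; simp)
          simp at this)
      rw [List.map_congr_left hval, List.map_const', List.length_range']
  | cons p rest ih =>
      intro s acc hs hmem hsort hcompl
      obtain ⟨j0, hj0eq, hj0s, hj0n, hj0m⟩ := hmem p (List.mem_cons_self ..)
      subst hj0eq
      simp only [List.foldl_cons]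
      have hpair : ((acc ++ PySem.List.pyRepeat [((j0:Nat):Int)] (((j0:Nat):Int) - ((s:Nat):Int) + 1), ((j0:Nat):Int) + 1) : List Int × Int)
          = (acc ++ List.replicate (j0 + 1 - s) ((j0:Nat):Int), (((j0+1 : Nat)):Int)) := by
        refine Prod.ext ?_ ?_
        · show acc ++ PySem.List.pyRepeat [((j0:Nat):Int)] (((j0:Nat):Int) - ((s:Nat):Int) + 1)
              = acc ++ List.replicate (j0 + 1 - s) ((j0:Nat):Int)
          rw [PySem.List.pyRepeat_singleton]
          congr 2
          omega
        · show ((j0:Nat):Int) + 1 = (((j0+1 : Nat)):Int)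
          push_cast; ring
      rw [hpair]
      rw [ih (j0+1) (acc ++ List.replicate (j0 + 1 - s) ((j0:Nat):Int)) (by omega)
        (by
          intro x hx
          obtain ⟨j, hjeq, hjs, hjn, hjm⟩ := hmem x (List.mem_cons_of_mem _ hx)
          refine ⟨j, hjeq, ?_, hjn, hjm⟩
          have hlt : ((j0:Nat):Int) < x := (List.pairwise_cons.mp hsort).1 x hx
          omega)
        ((List.pairwise_cons.mp hsort).2)
        (by
          intro j hj1 hj2 hjm
          have hin := hcompl j (by omega) hj2 hjm
          rcases List.mem_cons.mp hin with heq | h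
          · exfalso; omega
          · exact h)]
      rw [List.append_assoc]
      congr 1
      have hseg : ∀ i ∈ List.range' s (j0 + 1 - s), pvNxt e cs i = ((j0:Nat):Int) := by
        intro i hi
        rw [List.mem_range'_1] at hi
        refine pvNxt_upto e cs j0 hj0n hj0m i (by omega) ?_
        intro j hj1 hj2
        by_contra hne
        have hin := hcompl j (by omega) (by omega) (by revert hne; simp)
        rcases List.mem_cons.mp hin with heq | h
        · omega
        · have hlt : ((j0:Nat):Int) < ((j:Nat):Int) := (List.pairwise_cons.mp hsort).1 _ h
          omega
      have hsplit : List.range' s (cs.length - s)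
          = List.range' s (j0 + 1 - s) ++ List.range' (j0+1) (cs.length - (j0+1)) := by
        rw [show cs.length - s = (j0 + 1 - s) + (cs.length - (j0+1)) by omega,
            ← List.range'_append_1]
        congr 2
        omega
      rw [hsplit, List.map_append]
      congr 1
      rw [List.map_congr_left hseg, List.map_const', List.length_range']

-- Source B's occurrence list is exactly the (cast) match indices, in increasing order
theorem pvOcc_mem (e : String) (cs : List Char) (x : Int) :
    x ∈ ((PySem.List.enumerate cs 0).filter (fun p => String.ofList [p.2] == e)).map (fun p => p.1)
      ↔ ∃ j : Nat, x = (j:Int) ∧ j < cs.length ∧ pvMatch e cs j = true := by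
  simp only [List.mem_map, List.mem_filter, PySem.List.mem_enumerate_iff]
  constructor
  · rintro ⟨p, ⟨⟨k, hk, rfl⟩, hpred⟩, hx⟩
    refine ⟨k, ?_, hk, ?_⟩
    · simp at hx; omega
    · rw [pvMatch, List.getElem?_eq_getElem hk]
      simpa using hpred
  · rintro ⟨j, hx, hj, hm⟩
    rw [pvMatch, List.getElem?_eq_getElem hj] at hm
    simp only [Option.any_some] at hm
    exact ⟨((j:Int), cs[j]), ⟨⟨j, hj, by simp⟩, hm⟩, by simp [hx]⟩

theorem pvOcc_sorted (e : String) (cs : List Char) :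
    (((PySem.List.enumerate cs 0).filter (fun p => String.ofList [p.2] == e)).map
        (fun p => p.1)).Pairwise (· < ·) := by
  apply List.Pairwise.map
  · intro a b h; exact h
  · exact List.Pairwise.sublist List.filter_sublist (PySem.List.pairwise_lt_enumerate cs 0)

theorem pvRowB_eq (e seq : String) : pvRowB e seq = pvRowS e seq.toList := by
  unfold pvRowB
  simp only [PySem.Str.len_eq]
  have h := pvSegFold e seq.toList
    (((PySem.List.enumerate seq.toList 0).filter (fun p => String.ofList [p.2] == e)).map (fun p => p.1))
    0 [] (by omega)
    (by
      intro x hx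
      obtain ⟨j, h1, h2, h3⟩ := (pvOcc_mem e seq.toList x).mp hx
      exact ⟨j, h1, by omega, h2, h3⟩)
    (pvOcc_sorted e seq.toList)
    (by
      intro j _ hj hm
      exact (pvOcc_mem e seq.toList ((j:Int))).mpr ⟨j, rfl, hj, hm⟩)
  rw [show ((0:Nat):Int) = (0:Int) by norm_num] at h
  rw [h]
  unfold pvRowS
  rw [List.nil_append, Nat.sub_zero, ← List.range_eq_range']

theorem pvInsertConst {V : Type} (v : V) (d0 : V) :
    ∀ (Sig : List String) (d : PySem.Dict String V) (e : String), (e ∈ Sig ∨ d.getD e d0 = v) →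
      (Sig.foldl (fun d x => d.insert x v) d).getD e d0 = v := by
  intro Sig
  induction Sig with
  | nil => intro d e he; simpa using he.resolve_left (by simp)
  | cons x rest ih =>
      intro d e he
      simp only [List.foldl_cons]
      apply ih
      rcases he with he | he
      · rcases List.mem_cons.mp he with rfl | h
        · right; simp
        · left; exact h
      · by_cases hx : e = x
        · subst hx; right; simp
        · right; rw [PySem.Dict.getD_insert]; simp [hx, he]

theorem pvSingleFold {V : Type} (dV : V) (K : List String)
    (step : PySem.Dict String V → String → PySem.Dict String V) (F : String → V → V)
    (hkeys : ∀ d x, x ∈ K → d.keys = K → (step d x).keys = K)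
    (hself : ∀ d e, e ∈ K → d.keys = K → (step d e).getD e dV = F e (d.getD e dV))
    (hother : ∀ d x e, x ≠ e → (step d x).getD e dV = d.getD e dV) :
    ∀ (Sig : List String), (∀ x ∈ Sig, x ∈ K) → Sig.Nodup →
      ∀ d : PySem.Dict String V, d.keys = K →
        ((Sig.foldl step d).keys = K ∧
         ∀ e ∈ Sig, (Sig.foldl step d).getD e dV = F e (d.getD e dV)) := by
  have hpres : ∀ (l : List String) (d : PySem.Dict String V) (e : String), e ∉ l →
      (l.foldl step d).getD e dV = d.getD e dV := by
    intro l
    induction l with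
    | nil => intro d e _; rfl
    | cons y t iht =>
        intro d e hne
        simp only [List.foldl_cons]
        rw [iht _ _ (fun h => hne (List.mem_cons_of_mem _ h)),
            hother d y e (fun h : y = e => hne (h ▸ List.mem_cons_self ..))]
  intro Sig
  induction Sig with
  | nil => intro _ _ d hk; exact ⟨hk, by simp⟩
  | cons x rest ih =>
      intro hsub hnd d hk
      simp only [List.foldl_cons]
      have hxK : x ∈ K := hsub x (List.mem_cons_self ..)
      obtain ⟨hknd, hnd'⟩ := List.nodup_cons.mp hnd
      obtain ⟨hkeys', hval⟩ := ih (fun y hy => hsub y (List.mem_cons_of_mem _ hy)) hnd' _ (hkeys d x hxK hk)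
      refine ⟨hkeys', ?_⟩
      intro e he
      rcases List.mem_cons.mp he with rfl | he'
      · rw [hpres rest (step d e) e hknd, hself d e hxK hk]
      · rw [hval e he', hother d x e (fun h => hknd (h ▸ he'))]

theorem pvSeqA_read (Sigma : List String) (hnd : Sigma.Nodup)
    (T : PySem.Dict String (List (List Int))) (hk : T.keys = Sigma) (m : Nat) (s : String) :
    (pvSeqA Sigma T ((m : Int), s)).keys = Sigma ∧
    ∀ e ∈ Sigma, (m : Nat) < (T.getD e []).length →
      (pvSeqA Sigma T ((m : Int), s)).getD e [] =
        PySem.List.pySetD (T.getD e []) (m : Int)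
          ((PySem.List.pyGetD (T.getD e []) (m : Int) [] ++ (pvRowS e s.toList).reverse).reverse) := by
  unfold pvSeqA
  simp only [PySem.Str.len_eq]
  set np0 : PySem.Dict String Int :=
    Sigma.foldl (fun d e => d.insert e ((s.toList.length : Int))) PySem.Dict.empty with hnp0
  set st := ((PySem.List.pyRange 0 ((s.toList.length : Int)+1) 1).reverse).foldl
      (pvStepA Sigma ((m : Int)) s ((s.toList.length : Int))) (T, np0) with hst
  obtain ⟨hik, hival⟩ := pvIFold Sigma hnd s ((m : Int)) ((s.toList.length : Int))
      ((PySem.List.pyRange 0 ((s.toList.length : Int)+1) 1).reverse) (T, np0) hk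
  obtain ⟨hrk, hrval⟩ := pvSingleFold ([] : List (List Int)) Sigma
      (fun T e => T.modify e []
        (fun rows => PySem.List.pySetD rows ((m : Int)) ((PySem.List.pyGetD rows ((m : Int)) []).reverse)))
      (fun _ rows => PySem.List.pySetD rows ((m : Int)) ((PySem.List.pyGetD rows ((m : Int)) []).reverse))
      (by
        intro d x hx hkd
        have hcont : d.contains x = true := (PySem.Dict.contains_iff_mem_keys _ _).mpr (hkd ▸ hx)
        rw [PySem.Dict.keys_modify, PySem.Dict.keys_insert_of_contains _ _ hcont, hkd])
      (by intro d e he hkd; rw [PySem.Dict.getD_modify, if_pos rfl])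
      (by intro d x e hne; rw [PySem.Dict.getD_modify, if_neg (fun h => hne h.symm)])
      Sigma (fun _ h => h) hnd st.1 hik
  refine ⟨hrk, ?_⟩
  intro e he hm
  rw [hrval e he]
  have hnpe : np0.getD e 0 = ((s.toList.length : Int)) := by
    exact pvInsertConst _ _ _ _ _ (Or.inl he)
  have hpair := hival e he
  have hsc := pvAScalarFull e s s.toList rfl m (T.getD e []) hm
  rw [hnpe] at hpair
  rw [hsc] at hpair
  have h1 : st.1.getD e [] =
      PySem.List.pySetD (T.getD e []) ((m : Int))
        (PySem.List.pyGetD (T.getD e []) ((m : Int)) [] ++ (pvRowS e s.toList).reverse) :=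
    congrArg Prod.fst hpair
  rw [h1]
  rw [PySem.List.pySetD_natCast, PySem.List.pySetD_natCast, PySem.List.pySetD_natCast, List.set_set]
  congr 1
  rw [PySem.List.pyGetD_natCast, List.getD_eq_getElem _ [] (by simpa using hm),
      List.getElem_set_self]

theorem pvOuterFold (Sigma : List String) (hnd : Sigma.Nodup) :
    ∀ (suf : List String) (m : Nat) (T : PySem.Dict String (List (List Int)))
      (pref : String → List (List Int)),
      T.keys = Sigma →
      (∀ e, (pref e).length = m) →
      (∀ e ∈ Sigma, T.getD e [] = pref e ++ List.replicate suf.length []) →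
      ((PySem.List.enumerate suf (m : Int)).foldl (pvSeqA Sigma) T).keys = Sigma ∧
      ∀ e ∈ Sigma,
        ((PySem.List.enumerate suf (m : Int)).foldl (pvSeqA Sigma) T).getD e [] =
          pref e ++ suf.map (fun s => pvRowS e s.toList) := by
  intro suf
  induction suf with
  | nil =>
      intro m T pref hk hplen hval
      rw [PySem.List.enumerate_nil]
      simp only [List.foldl_nil, List.map_nil]
      exact ⟨hk, fun e he => by rw [hval e he]; simp⟩
  | cons s t ih =>
      intro m T pref hk hplen hval
      rw [PySem.List.enumerate_cons]
      simp only [List.foldl_cons]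
      obtain ⟨hk1, hval1⟩ := pvSeqA_read Sigma hnd T hk m s
      have hval1' : ∀ e ∈ Sigma, (pvSeqA Sigma T ((m : Int), s)).getD e [] =
          (pref e ++ [pvRowS e s.toList]) ++ List.replicate t.length [] := by
        intro e he
        have hm : (m : Nat) < (T.getD e []).length := by
          rw [hval e he]; simp [hplen e]
        rw [hval1 e he hm, hval e he]
        simp only [List.length_cons, List.replicate_succ]
        have hg : PySem.List.pyGetD (pref e ++ ([] :: List.replicate t.length ([] : List Int))) ((m:Nat):Int) []
            = [] := by
          rw [PySem.List.pyGetD_natCast]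
          simp [hplen e]
        rw [hg, PySem.List.pySetD_natCast]
        simp only [List.nil_append, List.reverse_reverse]
        rw [List.set_append, if_neg (by simp [hplen e])]
        rw [hplen e]
        simp
      have hcast : ((m : Int) + 1) = (((m+1 : Nat)) : Int) := by push_cast; ring
      rw [hcast]
      obtain ⟨hk2, hval2⟩ := ih (m+1) (pvSeqA Sigma T ((m : Int), s))
        (fun x => pref x ++ [pvRowS x s.toList]) hk1 (by intro x; simp [hplen x]) hval1'
      refine ⟨hk2, ?_⟩
      intro e he
      rw [hval2 e he]
      simp

-- ===== VERDICT (by name: the statement is the Claim_ definition above) =====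
theorem generate_transition_matrix_spec : Claim_equal_generate_transition_matrix := by
  intro S Sigma hdom hpre
  unfold Spec_generate_transition_matrix
  unfold generate_transition_matrix generate_transition_matrix_alt
  have hnd : Sigma.Nodup := hpre
  have hrepl : ((PySem.List.pyRange 0 (S.length : Int) 1).map (fun _ => ([] : List Int)))
      = List.replicate S.length ([] : List Int) := by
    rw [PySem.List.pyRange_zero]
    rw [List.map_map]
    rw [show ((S.length : Int)).toNat = S.length by omega]
    rw [show ((fun (_ : Int) => ([] : List Int)) ∘ fun (k : Nat) => ((k : Int)))
          = fun (_ : Nat) => ([] : List Int) from rfl]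
    rw [List.map_const', List.length_range]
  have hk0 : (Sigma.foldl (fun d e => d.insert e ((PySem.List.pyRange 0 (S.length : Int) 1).map (fun _ => ([] : List Int)))) (PySem.Dict.empty : PySem.Dict String (List (List Int)))).keys = Sigma := by
    rw [PySem.Dict.keys_foldl_insert]
    rw [PySem.Dict.keys_empty, PySem.Set.update_nil_left, PySem.Set.ofList_eq_self_of_nodup _ hnd]
  have hv0 : ∀ e ∈ Sigma,
      (Sigma.foldl (fun d e => d.insert e ((PySem.List.pyRange 0 (S.length : Int) 1).map (fun _ => ([] : List Int)))) (PySem.Dict.empty : PySem.Dict String (List (List Int)))).getD e []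
        = [] ++ List.replicate S.length ([] : List Int) := by
    intro e he
    rw [pvInsertConst _ _ _ _ _ (Or.inl he), hrepl, List.nil_append]
  obtain ⟨hfk, hfv⟩ := pvOuterFold Sigma hnd S 0
    (Sigma.foldl (fun d e => d.insert e ((PySem.List.pyRange 0 (S.length : Int) 1).map (fun _ => ([] : List Int)))) PySem.Dict.empty)
    (fun _ => []) hk0 (fun _ => rfl) hv0
  rw [Nat.cast_zero] at hfk hfv
  rw [PySem.Dict.items_eq_map_keys _ (by rw [hfk]; exact hnd) ([] : List (List Int))]
  rw [hfk]
  rw [PySem.Dict.items_foldl_insert_fresh Sigma (fun a => a) (fun a => S.map (fun seq => pvRowB a seq))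
        PySem.Dict.empty (by intro a _; rfl) (by simpa using hnd)]
  rw [show (PySem.Dict.empty : PySem.Dict String (List (List Int))).items = [] from rfl, List.nil_append]
  apply List.map_congr_left
  intro e he
  rw [hfv e he]
  refine Prod.ext rfl ?_
  apply List.map_congr_left
  intro s _
  rw [pvRowB_eq]
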